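-- pv_equiv track=rewrite | github.com/iagenerativa/hlcs | src/hlcs/memory/rag.py | _chunk_by_function
-- ===== SOURCE A (Python) =====
-- from typing import List, Dict, Any, Optional, Literal
--
-- def _chunk_by_function(content: str) -> List[str]:
--     """
--     Chunk by function/class definitions (Python-aware).
--
--     Extracts each function and class as a separate chunk.
--     """
--     import re
--
--     chunks = []
--     lines = content.split('\n')
--     i = 0
--
--     while i < len(lines):
--         line = lines[i]
--         stripped = line.strip()
--
--         # Found a function or class definition
--         if stripped.startswith('def ') or stripped.startswith('class '):
--             # Start collecting this function/class
--             func_lines = [line]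
--             base_indent = len(line) - len(line.lstrip())
--             i += 1
--
--             # Collect all indented lines that belong to this function
--             while i < len(lines):
--                 next_line = lines[i]
--                 next_stripped = next_line.strip()
--
--                 # Empty lines are part of the function
--                 if not next_stripped:
--                     func_lines.append(next_line)
--                     i += 1
--                     continue
--
--                 # Check indent
--                 next_indent = len(next_line) - len(next_line.lstrip())
--
--                 # If indented more than base, it's part of the function
--                 if next_indent > base_indent:
--                     func_lines.append(next_line)
--                     i += 1
--                 # If at same level and it's another def/class, stop here
--                 elif next_indent == base_indent and (next_stripped.startswith('def ') or next_stripped.startswith('class ')):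
--                     break
--                 # If dedented, stop
--                 elif next_indent < base_indent:
--                     break
--                 else:
--                     # Same indent but not def/class - might be after function
--                     break
--
--             # Save this function/class
--             chunk_text = '\n'.join(func_lines)
--             chunks.append(chunk_text)
--         else:
--             i += 1
--
--     return chunks
-- ===== SOURCE B (Python) =====
-- from typing import List
--
--
-- def _chunk_by_function(content: str) -> List[str]:
--     lines = content.split('\n')
--     n = len(lines)
--
--     def ind(l):
--         return len(l) - len(l.lstrip())
--
--     headers = [(i, ind(l)) for i, l in enumerate(lines)
--                if l.strip().startswith('def ') or l.strip().startswith('class ')]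
--
--     chunks = []
--     consumed_until = 0
--     for h, base in headers:
--         if h < consumed_until:
--             continue  # header was nested inside a previous chunk
--         end = next((j for j in range(h + 1, n)
--                     if lines[j].strip() and ind(lines[j]) <= base), n)
--         chunks.append('\n'.join(lines[h:end]))
--         consumed_until = end
--     return chunks
-- ===== Notes on version B (the rewrite author's own statement) =====
-- stated objective: alternative
-- what changed: A's single stateful scan (outer while over a shared line index with a nested collection while) is replaced by first building the list of (index, indent) header positions and then folding over it with a consumed_until cursor, computing each chunk's end as the first following non-empty line with indent <= base and slicing lines[h:end].
import Mathlib
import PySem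

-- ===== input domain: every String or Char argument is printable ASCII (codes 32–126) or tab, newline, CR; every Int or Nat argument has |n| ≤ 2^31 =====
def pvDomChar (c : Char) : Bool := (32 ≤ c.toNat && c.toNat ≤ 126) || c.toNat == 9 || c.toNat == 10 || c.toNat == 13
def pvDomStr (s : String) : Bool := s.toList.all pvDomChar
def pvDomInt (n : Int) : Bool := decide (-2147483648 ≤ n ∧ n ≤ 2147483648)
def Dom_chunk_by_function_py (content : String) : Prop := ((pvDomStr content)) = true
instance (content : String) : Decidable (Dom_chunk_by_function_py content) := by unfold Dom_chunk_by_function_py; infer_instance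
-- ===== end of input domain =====

-- B replaces A's single stateful scan (outer while + inner collection while sharing the cursor `i`)
-- by a precomputed list of header positions folded with a `consumed_until` cursor; objective: alternative decomposition.

-- shared small helpers (used by both ports): Python's `len(line) - len(line.lstrip())` and the header test
def pvIndent (l : List Char) : Nat := l.length - (PySem.Chars.lstrip l).length

def pvIsHeader (l : List Char) : Bool :=
  PySem.Chars.startswith (PySem.Chars.strip l) ("def ".toList)
    || PySem.Chars.startswith (PySem.Chars.strip l) ("class ".toList)

-- ===== PORT A =====
-- A's inner `while` loop: collects the lines belonging to the chunk, returns (collected, remaining);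
-- the branch order is A's: empty line → keep; indent > base → keep; same-indent def/class → break;
-- dedent → break; otherwise → break.
def pvCollectA (base : Nat) : List (List Char) → List (List Char) × List (List Char)
  | [] => ([], [])
  | l :: rest =>
    if (PySem.Chars.strip l).isEmpty then
      let r := pvCollectA base rest
      (l :: r.1, r.2)
    else if base < pvIndent l then
      let r := pvCollectA base rest
      (l :: r.1, r.2)
    else if pvIndent l == base && pvIsHeader l then
      ([], l :: rest)
    else if pvIndent l < base then
      ([], l :: rest)
    else
      ([], l :: rest)

-- termination fact the port's outer loop needs: the remainder is no longer than the input
theorem pvCollectA_snd_length (base : Nat) (xs : List (List Char)) :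
    (pvCollectA base xs).2.length ≤ xs.length := by
  induction xs with
  | nil => simp [pvCollectA]
  | cons l rest ih =>
    simp only [pvCollectA]
    split_ifs <;> simp <;> omega

-- A's outer `while i < len(lines)` loop
def pvLoopA : List (List Char) → List String
  | [] => []
  | l :: rest =>
    if pvIsHeader l then
      let r := pvCollectA (pvIndent l) rest
      String.ofList (PySem.Chars.join ['\n'] (l :: r.1)) :: pvLoopA r.2
    else
      pvLoopA rest
termination_by xs => xs.length
decreasing_by
  · have := pvCollectA_snd_length (pvIndent l) rest
    simp; omega
  · simp

def chunk_by_function_py (content : String) : List String :=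
  pvLoopA (PySem.Chars.splitOn content.toList ['\n'])

-- ===== PORT B =====
-- Source B's `lines[j].strip() and ind(lines[j]) <= base`
def pvStop (base : Nat) (l : List Char) : Bool :=
  !(PySem.Chars.strip l).isEmpty && decide (pvIndent l ≤ base)

-- Source B's comprehension: [(i, ind(l)) for i, l in enumerate(lines) if header(l)]
def pvHeaders (lines : List (List Char)) : List (Int × Nat) :=
  ((PySem.List.enumerate lines).filter (fun p => pvIsHeader p.2)).map (fun p => (p.1, pvIndent p.2))

-- Source B's `for h, base in headers` loop carrying (chunks, consumed_until);
-- `next((j for j in range(h+1, n) if …), n)` is ported as findIdx over the suffix lines[h+1:]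
-- (exact: h ≥ 0 here, and findIdx returns the suffix length when no line matches, i.e. j = n).
def pvLoopB (lines : List (List Char)) : List (Int × Nat) → Int → List String
  | [], _ => []
  | (h, base) :: hs, cu =>
    if h < cu then pvLoopB lines hs cu
    else
      let e : Int := h + 1 + (List.findIdx (pvStop base) (lines.drop (h + 1).toNat) : Nat)
      String.ofList (PySem.Chars.join ['\n'] (PySem.List.slice lines (some h) (some e)))
        :: pvLoopB lines hs e

def chunk_by_function_py_alt (content : String) : List String :=
  let lines := PySem.Chars.splitOn content.toList ['\n']
  pvLoopB lines (pvHeaders lines) 0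

-- ===== PRECONDITION & SPEC =====
def Spec_chunk_by_function_py (content : String) (out : List String) : Prop := out = chunk_by_function_py_alt content
instance (content : String) (out : List String) : Decidable (Spec_chunk_by_function_py content out) := by unfold Spec_chunk_by_function_py; infer_instance

-- ===== CLAIM (what is proved, stated in full; the proofs are below) =====
def Claim_equal_chunk_by_function_py : Prop := ∀ (content : String), Dom_chunk_by_function_py content → Spec_chunk_by_function_py content (chunk_by_function_py content)

-- ===== LEMMAS AND PROOFS =====

-- reference scan by absolute index: at a header, jump to the first stopping line; else advance by one
def pvLoopI (lines : List (List Char)) (cu : Nat) : List String :=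
  if h : cu < lines.length then
    if pvIsHeader lines[cu] then
      let e := cu + 1 + List.findIdx (pvStop (pvIndent lines[cu])) (lines.drop (cu + 1))
      String.ofList (PySem.Chars.join ['\n'] (List.take (e - cu) (lines.drop cu))) :: pvLoopI lines e
    else pvLoopI lines (cu + 1)
  else []
termination_by lines.length - cu
decreasing_by
  · omega
  · omega

-- A's inner loop splits the suffix exactly at the first stopping line
theorem pvCollectA_eq (base : Nat) (xs : List (List Char)) :
    pvCollectA base xs =
      (xs.take (List.findIdx (pvStop base) xs), xs.drop (List.findIdx (pvStop base) xs)) := by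
  induction xs with
  | nil => simp [pvCollectA]
  | cons l rest ih =>
    simp only [pvCollectA, List.findIdx_cons, pvStop]
    by_cases he : (PySem.Chars.strip l).isEmpty
    · simp [he, ih]
    · by_cases hgt : base < pvIndent l
      · have : decide (pvIndent l ≤ base) = false := by simp; omega
        simp [he, hgt, this, ih]
      · have : decide (pvIndent l ≤ base) = true := by simp; omega
        simp only [he, this, Bool.not_false, Bool.and_true, cond_true]
        split_ifs <;> simp_all

theorem pvLoopA_eq_I (lines : List (List Char)) :
    ∀ n cu, lines.length - cu ≤ n → pvLoopA (lines.drop cu) = pvLoopI lines cu := by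
  intro n
  induction n with
  | zero =>
    intro cu hcu
    have h1 : lines.length ≤ cu := by omega
    rw [List.drop_eq_nil_of_le h1]
    rw [pvLoopI]
    simp [pvLoopA, Nat.not_lt.mpr h1]
  | succ n ih =>
    intro cu hcu
    by_cases hlt : cu < lines.length
    · rw [List.drop_eq_getElem_cons hlt, pvLoopI, dif_pos hlt]
      by_cases hh : pvIsHeader lines[cu]
      · rw [pvLoopA, if_pos hh, pvCollectA_eq]
        set k := List.findIdx (pvStop (pvIndent lines[cu])) (lines.drop (cu + 1)) with hk
        have hkle : k ≤ lines.length - (cu + 1) := by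
          have := List.findIdx_le_length (p := pvStop (pvIndent lines[cu])) (xs := lines.drop (cu + 1))
          simpa using this
        rw [if_pos hh]
        have hdrop : List.drop k (lines.drop (cu + 1)) = lines.drop (cu + 1 + k) := by
          rw [List.drop_drop]
        have htake : List.take (cu + 1 + k - cu) (List.drop cu lines)
            = lines[cu] :: List.take k (lines.drop (cu + 1)) := by
          have : cu + 1 + k - cu = k + 1 := by omega
          rw [this, List.drop_eq_getElem_cons hlt, List.take_succ_cons]
        simp only [hdrop, htake]
        congr 1
        exact ih (cu + 1 + k) (by omega)
      · rw [pvLoopA, if_neg hh, if_neg hh]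
        exact ih (cu + 1) (by omega)
    · have h1 : lines.length ≤ cu := by omega
      rw [List.drop_eq_nil_of_le h1]
      rw [pvLoopI]
      simp [pvLoopA, Nat.not_lt.mpr h1]

-- generic dropWhile facts
theorem pvDropWhile_imp {α : Type} (p q : α → Bool) (h : ∀ x, p x = true → q x = true)
    (l : List α) : List.dropWhile q l = List.dropWhile q (List.dropWhile p l) := by
  induction l with
  | nil => rfl
  | cons x xs ih =>
    by_cases hp : p x = true
    · rw [List.dropWhile_cons, if_pos (h x hp), List.dropWhile_cons, if_pos hp, ih]
    · rw [List.dropWhile_cons (p := p), if_neg hp]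

theorem pvDropWhile_head (c : Int) (b : Nat) (l : List (Int × Nat))
    (hp : List.Pairwise (fun p q => p.1 < q.1) l) (hm : (c, b) ∈ l) :
    List.dropWhile (fun p => decide (p.1 < c)) l
      = (c, b) :: List.dropWhile (fun p => decide (p.1 < c + 1)) l := by
  induction l with
  | nil => simp at hm
  | cons x xs ih =>
    rcases List.mem_cons.mp hm with hx | hx
    · subst hx
      have hall : ∀ y ∈ xs, c < y.1 := by
        intro y hy; exact (List.pairwise_cons.mp hp).1 y hy
      rw [List.dropWhile_cons, if_neg (by simp)]
      rw [List.dropWhile_cons, if_pos (by simp)]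
      congr 1
      rcases hxs : xs with _ | ⟨y, ys⟩
      · simp
      · rw [List.dropWhile_cons, if_neg]
        have := hall y (by rw [hxs]; exact List.mem_cons_self ..)
        simp; omega
    · have hlt : x.1 < c := by
        have := (List.pairwise_cons.mp hp).1 _ hx
        exact this
      rw [List.dropWhile_cons, if_pos (by simp; omega),
          List.dropWhile_cons, if_pos (by simp; omega)]
      exact ih (List.pairwise_cons.mp hp).2 hx

-- skipping the already-consumed headers up front changes nothing
theorem pvLoopB_dropWhile (lines : List (List Char)) (hs : List (Int × Nat)) (cu : Int) :
    pvLoopB lines hs cu = pvLoopB lines (hs.dropWhile (fun p => decide (p.1 < cu))) cu := by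
  induction hs with
  | nil => rfl
  | cons x xs ih =>
    obtain ⟨h, base⟩ := x
    by_cases hlt : h < cu
    · rw [pvLoopB, if_pos hlt, List.dropWhile_cons, if_pos (by simpa)]
      exact ih
    · rw [List.dropWhile_cons, if_neg (by simpa using hlt)]

-- membership facts about the precomputed header list
theorem pvMem_headers {lines : List (List Char)} {h : Int} {b : Nat}
    (hm : (h, b) ∈ pvHeaders lines) :
    ∃ k : Nat, ∃ hk : k < lines.length,
      h = (k : Int) ∧ b = pvIndent lines[k] ∧ pvIsHeader lines[k] = true := by
  obtain ⟨⟨i, l⟩, hmem, heq⟩ := List.mem_map.mp hm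
  have hf := List.mem_filter.mp hmem
  obtain ⟨k, hk, hkl⟩ := (PySem.List.mem_enumerate_iff lines 0 (i, l)).mp hf.1
  refine ⟨k, hk, ?_, ?_, ?_⟩
  · cases heq; cases hkl; simp
  · cases heq; cases hkl; simp
  · have := hf.2; cases heq; cases hkl; simpa using this

theorem pvHeaders_mem {lines : List (List Char)} {k : Nat} (hk : k < lines.length)
    (hh : pvIsHeader lines[k] = true) :
    ((k : Int), pvIndent lines[k]) ∈ pvHeaders lines := by
  apply List.mem_map.mpr
  refine ⟨((k : Int), lines[k]), ?_, rfl⟩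
  apply List.mem_filter.mpr
  exact ⟨(PySem.List.mem_enumerate_iff lines 0 _).mpr ⟨k, hk, by simp⟩, hh⟩

theorem pvHeaders_pairwise (lines : List (List Char)) :
    List.Pairwise (fun p q => p.1 < q.1) (pvHeaders lines) := by
  apply List.Pairwise.map
  case H => exact fun a b h => h
  exact List.Pairwise.filter _ (PySem.List.pairwise_lt_enumerate lines 0)

theorem pvLoopB_cursor (lines : List (List Char)) (h : Int) (base : Nat)
    (hs : List (Int × Nat)) (cu cu' : Int) (h1 : ¬ h < cu) (h2 : ¬ h < cu') :
    pvLoopB lines ((h, base) :: hs) cu = pvLoopB lines ((h, base) :: hs) cu' := by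
  rw [pvLoopB, pvLoopB, if_neg h1, if_neg h2]

theorem pvLoopB_eq_I (lines : List (List Char)) :
    ∀ n cu, lines.length - cu ≤ n →
      pvLoopB lines ((pvHeaders lines).dropWhile (fun p => decide (p.1 < (cu : Int)))) (cu : Int)
        = pvLoopI lines cu := by
  intro n
  induction n with
  | zero =>
    intro cu hcu
    have h1 : lines.length ≤ cu := by omega
    have hnil : (pvHeaders lines).dropWhile (fun p => decide (p.1 < (cu : Int))) = [] := by
      apply List.dropWhile_eq_nil_iff.mpr
      intro x hx
      obtain ⟨k, hk, hx1, _, _⟩ := pvMem_headers hx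
      simp [hx1]; omega
    rw [hnil, pvLoopI]
    simp [pvLoopB, Nat.not_lt.mpr h1]
  | succ n ih =>
    intro cu hcu
    by_cases hlt : cu < lines.length
    · rw [pvLoopI, dif_pos hlt]
      by_cases hh : pvIsHeader lines[cu]
      · rw [if_pos hh]
        have hmem := pvHeaders_mem hlt hh
        rw [pvDropWhile_head _ _ _ (pvHeaders_pairwise lines) hmem]
        rw [pvLoopB, if_neg (by omega)]
        set k := List.findIdx (pvStop (pvIndent lines[cu])) (lines.drop (cu + 1)) with hk
        have hkle : k ≤ lines.length - (cu + 1) := by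
          have := List.findIdx_le_length (p := pvStop (pvIndent lines[cu])) (xs := lines.drop (cu + 1))
          simpa using this
        have htonat : ((cu : Int) + 1).toNat = cu + 1 := by omega
        simp only [htonat, ← hk]
        have hcast : (cu : Int) + 1 + (k : Int) = ((cu + 1 + k : Nat) : Int) := by push_cast; ring
        rw [List.cons_eq_cons]
        refine ⟨?_, ?_⟩
        · congr 1
          rw [hcast, PySem.List.slice_of_nonneg lines (by omega) (by omega) (by omega) (by push_cast; omega)]
          simp
          have ht3 : ((cu : Int) + 1 + (k : Int)).toNat - cu = cu + 1 + k - cu := by omega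
          rw [ht3]
        · rw [hcast, pvLoopB_dropWhile]
          have h2 := pvDropWhile_imp (α := Int × Nat)
            (fun p => decide (p.1 < (cu : Int) + 1))
            (fun p => decide (p.1 < ((cu + 1 + k : Nat) : Int)))
            (by intro x hx; simp at hx ⊢; omega) (pvHeaders lines)
          rw [← h2]
          exact ih (cu + 1 + k) (by omega)
      · rw [if_neg hh]
        have h2 := pvDropWhile_imp (α := Int × Nat)
          (fun p => decide (p.1 < (cu : Int)))
          (fun p => decide (p.1 < ((cu + 1 : Nat) : Int)))
          (by intro x hx; simp at hx ⊢; omega) (pvHeaders lines)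
        have hstep : (pvHeaders lines).dropWhile (fun p => decide (p.1 < (cu : Int)))
            = (pvHeaders lines).dropWhile (fun p => decide (p.1 < ((cu + 1 : Nat) : Int))) := by
          rw [h2]
          rcases hd : (pvHeaders lines).dropWhile (fun p => decide (p.1 < (cu : Int))) with _ | ⟨y, ys⟩
          · rw [hd]
            simp
          · have hy : y ∈ pvHeaders lines :=
              (List.dropWhile_sublist _).mem (by rw [hd]; exact List.mem_cons_self ..)
            obtain ⟨m, hm, hy1, _, hyh⟩ := pvMem_headers (by simpa using hy)
            have hne : m ≠ cu := fun hcontra => by subst hcontra; exact hh hyh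
            have hge : ¬ (y.1 < (cu : Int)) := by
              have := List.head?_dropWhile_not (fun p => decide (p.1 < (cu : Int))) (pvHeaders lines)
              rw [hd] at this
              simpa using this
            rw [hd, List.dropWhile_cons, if_neg (by rw [hy1] at hge ⊢; simp at hge ⊢; push_cast; omega)]
        rw [hstep]
        have hIH := ih (cu + 1) (by omega)
        rcases hd2 : (pvHeaders lines).dropWhile (fun p => decide (p.1 < ((cu + 1 : Nat) : Int))) with _ | ⟨⟨yh, yb⟩, ys⟩
        · rw [hd2] at hIH
          rw [hd2]
          simp only [pvLoopB] at hIH ⊢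
          exact hIH
        · rw [hd2] at hIH
          rw [hd2]
          have hge : ¬ ((yh : Int) < (((cu + 1 : Nat) : Int))) := by
            have := List.head?_dropWhile_not (fun p => decide (p.1 < ((cu + 1 : Nat) : Int))) (pvHeaders lines)
            rw [hd2] at this
            simpa using this
          have hge' : ¬ ((yh : Int) < ((cu : Nat) : Int)) := by
            push_cast at hge ⊢
            omega
          rw [pvLoopB_cursor lines yh yb ys ((cu : Nat) : Int) (((cu + 1 : Nat) : Int)) hge' hge]
          exact hIH
    · have h1 : lines.length ≤ cu := by omega
      have hnil : (pvHeaders lines).dropWhile (fun p => decide (p.1 < (cu : Int))) = [] := by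
        apply List.dropWhile_eq_nil_iff.mpr
        intro x hx
        obtain ⟨k, hk, hx1, _, _⟩ := pvMem_headers hx
        simp [hx1]; omega
      rw [hnil, pvLoopI]
      simp [pvLoopB, Nat.not_lt.mpr h1]

-- ===== VERDICT (by name: the statement is the Claim_ definition above) =====
theorem chunk_by_function_py_spec : Claim_equal_chunk_by_function_py := by
  intro content _
  unfold Spec_chunk_by_function_py chunk_by_function_py chunk_by_function_py_alt
  set lines := PySem.Chars.splitOn content.toList ['\n'] with hl
  have hA := pvLoopA_eq_I lines lines.length 0 (by omega)
  have hB := pvLoopB_eq_I lines lines.length 0 (by omega)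
  simp only [List.drop_zero, Nat.cast_zero] at hA hB
  rw [hA, ← hB]
  congr 1
  rcases hd : pvHeaders lines with _ | ⟨y, ys⟩
  · simp
  · rw [List.dropWhile_cons, if_neg]
    have hy : y ∈ pvHeaders lines := by rw [hd]; exact List.mem_cons_self ..
    obtain ⟨k, hk, hy1, _, _⟩ := pvMem_headers hy
    simp [hy1]
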